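-- pv_equiv track=rewrite | github.com/yashinrostislav/MADE_2021 | term1/algorithms and data structures/2 sorts and ordinal statistics/task_4.py | brain_explosion
-- ===== SOURCE A (Python) =====
-- def enough(arr1, arr2):
--     for a, b in zip(arr1, arr2):
--         if a < b:
--             return False
--     return True
--
-- def ord_letter(letter):
--     return ord(letter) - ord('a')
--
-- def brain_explosion(string, cards):
--     crd_cnt = [0] * 26
--     for c in cards:
--         crd_cnt[ord_letter(c)] += 1
--     ans = left = right = 0
--     moved_right = True
--     tmp_count = [0] * 26
--     while right < len(string):
--         if moved_right:
--             rgt = string[right]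
--             tmp_count[ord_letter(rgt)] += 1
--         if not enough(crd_cnt, tmp_count):
--             lft = string[left]
--             tmp_count[ord_letter(lft)] -= 1
--             left += 1
--             moved_right = False
--             continue
--         ans += right - left + 1
--         right += 1
--         moved_right = True
--     return ans
-- ===== SOURCE B (Python) =====
-- def brain_explosion(string, cards):
--     crd_cnt = [0] * 26
--     for c in cards:
--         crd_cnt[ord(c) - 97] += 1
--     cnt = [0] * 26
--     ans = 0
--     left = 0
--     bad = 0  # number of letters whose window count exceeds the card count
--     for right in range(len(string)):
--         i = ord(string[right]) - 97
--         cnt[i] += 1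
--         if cnt[i] == crd_cnt[i] + 1:
--             bad += 1
--         while bad:
--             j = ord(string[left]) - 97
--             cnt[j] -= 1
--             if cnt[j] == crd_cnt[j]:
--                 bad -= 1
--             left += 1
--         ans += right - left + 1
--     return ans
-- ===== Notes on version B (the rewrite author's own statement) =====
-- stated objective: faster
-- what changed: The per-step 26-letter rescan via enough() (and the moved_right flag machinery of A's flat while loop) is replaced by an incrementally maintained counter 'bad' of letters whose window count exceeds the card count, in a standard for/while sliding window, making each pointer move O(1).
import Mathlib
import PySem

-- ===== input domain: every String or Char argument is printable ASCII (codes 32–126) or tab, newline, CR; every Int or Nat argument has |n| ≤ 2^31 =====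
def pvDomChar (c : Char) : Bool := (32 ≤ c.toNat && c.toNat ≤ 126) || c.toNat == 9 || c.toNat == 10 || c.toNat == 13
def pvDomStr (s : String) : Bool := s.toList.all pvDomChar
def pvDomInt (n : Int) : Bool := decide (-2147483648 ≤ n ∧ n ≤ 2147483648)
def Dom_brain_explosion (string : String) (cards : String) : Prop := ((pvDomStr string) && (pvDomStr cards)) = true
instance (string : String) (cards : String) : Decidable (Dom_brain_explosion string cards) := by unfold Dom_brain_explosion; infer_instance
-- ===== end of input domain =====

-- B replaces A's per-step 26-letter rescan (enough()) by an incrementally maintained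
-- violation counter in a standard for/while sliding window: O(n) instead of O(26n)
-- (the Python timing run reports B measurably faster).

-- ===== PORT A =====

-- Python's arr[ord(c)-ord('a')] on a 26-list: exact for chars 'G'..'z' (the range
-- admitted by Pre_, outside which Python raises IndexError): negative indices wrap by +26.
def pvIdx (c : Char) : Nat := (c.toNat + 26 - 97) % 26

-- arr[i] += d on a 26-list (i in range)
def pvBump (l : List Int) (i : Nat) (d : Int) : List Int := l.set i (l.getD i 0 + d)

def enough : List Int → List Int → Bool
  | a :: t1, b :: t2 => if a < b then false else enough t1 t2
  | _, _ => true

-- the card-counting preamble loop (identical in A and B)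
def pvCounts (cs : List Char) : List Int :=
  cs.foldl (fun t c => pvBump t (pvIdx c) 1) (List.replicate 26 0)

-- A's flat while loop with the moved_right flag; fuel makes it total (2n+2 always suffices)
def brainLoop (s : List Char) (crd : List Int) :
    Nat → List Int → Nat → Nat → Int → Bool → Int
  | 0, _, _, _, ans, _ => ans
  | fuel+1, tmp, left, right, ans, moved =>
    if right < s.length then
      let tmp1 := if moved then pvBump tmp (pvIdx (s.getD right ' ')) 1 else tmp
      if enough crd tmp1 then
        brainLoop s crd fuel tmp1 left (right+1) (ans + ((right : Int) - (left : Int) + 1)) true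
      else
        brainLoop s crd fuel (pvBump tmp1 (pvIdx (s.getD left ' ')) (-1)) (left+1) right ans false
    else ans

def brain_explosion (string : String) (cards : String) : Int :=
  brainLoop string.toList (pvCounts cards.toList)
    (2 * string.toList.length + 2) (List.replicate 26 0) 0 0 0 true

-- ===== PORT B =====

-- B's inner `while bad:` shrink loop; fuel right+1 always suffices
def shrinkB (s : List Char) (crd : List Int) :
    Nat → List Int → Nat → Int → List Int × Nat × Int
  | 0, cnt, left, bad => (cnt, left, bad)
  | fuel+1, cnt, left, bad =>
    if bad > 0 then
      let j := pvIdx (s.getD left ' ')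
      let cnt' := pvBump cnt j (-1)
      let bad' := if cnt'.getD j 0 = crd.getD j 0 then bad - 1 else bad
      shrinkB s crd fuel cnt' (left+1) bad'
    else (cnt, left, bad)

-- one iteration of B's `for right in range(len(string))`; state = (cnt, left, bad, ans)
def stepB (s : List Char) (crd : List Int)
    (st : List Int × Nat × Int × Int) (right : Nat) : List Int × Nat × Int × Int :=
  let i := pvIdx (s.getD right ' ')
  let cnt1 := pvBump st.1 i 1
  let bad1 := if cnt1.getD i 0 = crd.getD i 0 + 1 then st.2.2.1 + 1 else st.2.2.1
  let r := shrinkB s crd (right+1) cnt1 st.2.1 bad1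
  (r.1, r.2.1, r.2.2, st.2.2.2 + ((right : Int) - (r.2.1 : Int) + 1))

def brain_explosion_alt (string : String) (cards : String) : Int :=
  ((List.range string.toList.length).foldl
    (stepB string.toList (pvCounts cards.toList))
    (List.replicate 26 0, 0, 0, 0)).2.2.2

-- ===== PRECONDITION & SPEC =====
-- Exactly the inputs where Python A returns: every character of both strings must lie in
-- 'G'..'z' (codes 71..122), otherwise ord(c)-ord('a') is out of range for the 26-list and
-- A (and B alike) raises IndexError.
def Pre_brain_explosion (string : String) (cards : String) : Prop :=
  (string.toList.all fun c => 71 ≤ c.toNat && c.toNat ≤ 122) = true ∧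
  (cards.toList.all fun c => 71 ≤ c.toNat && c.toNat ≤ 122) = true
instance (string : String) (cards : String) : Decidable (Pre_brain_explosion string cards) := by
  unfold Pre_brain_explosion; infer_instance

def pvWitness_brain_explosion : String × String := ("abcab", "abc")

def Spec_brain_explosion (string : String) (cards : String) (out : Int) : Prop := out = brain_explosion_alt string cards
instance (string : String) (cards : String) (out : Int) : Decidable (Spec_brain_explosion string cards out) := by unfold Spec_brain_explosion; infer_instance

-- ===== CLAIM (what is proved, stated in full; the proofs are below) =====
def Claim_equal_brain_explosion : Prop := ∀ (string : String) (cards : String), Dom_brain_explosion string cards → Pre_brain_explosion string cards → Spec_brain_explosion string cards (brain_explosion string cards)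

-- ===== LEMMAS AND PROOFS =====

-- number of letters whose window count exceeds the card count
def violN (crd tmp : List Int) : Nat := (crd.zip tmp).countP (fun p => decide (p.1 < p.2))

-- the window of already-added letter indices, half-open [l, r)
def win (s : List Char) (l r : Nat) : List Nat := ((s.drop l).take (r - l)).map pvIdx

-- tmp is the per-letter count of the window
def WInv (tmp : List Int) (w : List Nat) : Prop :=
  tmp.length = 26 ∧ ∀ i, i < 26 → tmp.getD i 0 = (w.count i : Int)

theorem pvIdx_lt (c : Char) : pvIdx c < 26 := Nat.mod_lt _ (by norm_num)

theorem getD_set (l : List Int) (i j : Nat) (v : Int) :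
    (l.set i v).getD j 0 = if i = j ∧ i < l.length then v else l.getD j 0 := by
  induction l generalizing i j with
  | nil => simp
  | cons a t ih =>
    cases i with
    | zero => cases j <;> simp [List.set]
    | succ i =>
      cases j with
      | zero => simp [List.set]
      | succ j => simp only [List.set, List.getD_cons_succ, List.length_cons, ih]; omega

theorem enough_iff (a b : List Int) : enough a b = true ↔ violN a b = 0 := by
  induction a generalizing b with
  | nil => simp [enough, violN]
  | cons x t ih =>
    cases b with
    | nil => simp [enough, violN]
    | cons y u =>
      simp only [enough, violN, List.zip_cons_cons, List.countP_cons, decide_eq_true_eq]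
      by_cases h : x < y <;> simp [h, ih, violN]

theorem violN_witness (a b : List Int) (h : violN a b ≠ 0) :
    ∃ i, i < a.length ∧ i < b.length ∧ a.getD i 0 < b.getD i 0 := by
  induction a generalizing b with
  | nil => simp [violN] at h
  | cons x t ih =>
    cases b with
    | nil => simp [violN] at h
    | cons y u =>
      by_cases hxy : x < y
      · exact ⟨0, by simp, by simp, by simpa using hxy⟩
      · have h' : violN t u ≠ 0 := by
          simpa [violN, List.countP_cons, hxy] using h
        obtain ⟨i, h1, h2, h3⟩ := ih u h'
        exact ⟨i + 1, by simpa using h1, by simpa using h2, by simpa using h3⟩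

theorem viol_set (crd tmp : List Int) (i : Nat) (v : Int)
    (hi : i < tmp.length) (hi' : i < crd.length) :
    (violN crd (tmp.set i v) : Int) + (if crd.getD i 0 < tmp.getD i 0 then 1 else 0)
      = (violN crd tmp : Int) + (if crd.getD i 0 < v then 1 else 0) := by
  induction crd generalizing tmp i with
  | nil => simp at hi'
  | cons c cs ih =>
    cases tmp with
    | nil => simp at hi
    | cons t ts =>
      cases i with
      | zero =>
        simp only [List.set, violN, List.zip_cons_cons, List.countP_cons,
          List.getD_cons_zero, decide_eq_true_eq]
        split_ifs <;> push_cast <;> omega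
      | succ i =>
        have h1 : i < ts.length := by simpa using hi
        have h2 : i < cs.length := by simpa using hi'
        have h3 := ih ts i h1 h2
        simp only [List.set, violN, List.zip_cons_cons, List.countP_cons,
          List.getD_cons_succ, decide_eq_true_eq] at *
        split_ifs at * <;> push_cast at * <;> omega

theorem violN_inc (crd tmp : List Int) (i : Nat)
    (hi : i < 26) (h1 : tmp.length = 26) (h2 : crd.length = 26) :
    (violN crd (pvBump tmp i 1) : Int)
      = (violN crd tmp : Int)
        + (if (pvBump tmp i 1).getD i 0 = crd.getD i 0 + 1 then 1 else 0) := by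
  have hv := viol_set crd tmp i (tmp.getD i 0 + 1) (by omega) (by omega)
  have hg : (pvBump tmp i 1).getD i 0 = tmp.getD i 0 + 1 := by
    rw [pvBump, getD_set]; simp [h1, hi]
  rw [pvBump] at *
  rw [hg]
  split_ifs at * <;> omega

theorem violN_dec (crd tmp : List Int) (i : Nat)
    (hi : i < 26) (h1 : tmp.length = 26) (h2 : crd.length = 26) :
    (violN crd (pvBump tmp i (-1)) : Int)
      = (violN crd tmp : Int)
        - (if (pvBump tmp i (-1)).getD i 0 = crd.getD i 0 then 1 else 0) := by
  have hv := viol_set crd tmp i (tmp.getD i 0 + (-1)) (by omega) (by omega)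
  have hg : (pvBump tmp i (-1)).getD i 0 = tmp.getD i 0 + (-1) := by
    rw [pvBump, getD_set]; simp [h1, hi]
  rw [pvBump] at *
  rw [hg]
  split_ifs at * <;> omega

theorem pvBump_length (l : List Int) (i : Nat) (d : Int) :
    (pvBump l i d).length = l.length := by simp [pvBump]

theorem win_empty (s : List Char) (l : Nat) : win s l l = [] := by simp [win]

theorem win_extend (s : List Char) (l r : Nat) (hlr : l ≤ r) (hr : r < s.length) :
    win s l (r + 1) = win s l r ++ [pvIdx (s.getD r ' ')] := by
  unfold win
  have hd : r - l < (s.drop l).length := by simp; omega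
  rw [show r + 1 - l = (r - l) + 1 by omega, List.take_add_one]
  have : (s.drop l)[r - l]? = some (s.getD r ' ') := by
    rw [List.getElem?_drop, show l + (r - l) = r by omega,
      List.getElem?_eq_getElem hr, List.getD_eq_getElem _ _ hr]
  simp [this]

theorem win_shrink (s : List Char) (l r : Nat) (hlr : l ≤ r) (hr : r < s.length) :
    win s l (r + 1) = pvIdx (s.getD l ' ') :: win s (l + 1) (r + 1) := by
  unfold win
  have hl : l < s.length := by omega
  rw [List.drop_eq_getElem_cons hl, show r + 1 - l = (r - l) + 1 by omega, List.take_succ_cons,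
    show r + 1 - (l + 1) = r - l by omega, List.map_cons, List.getD_eq_getElem _ _ hl]

theorem WInv_add (tmp : List Int) (w : List Nat) (j : Nat) (hj : j < 26)
    (h : WInv tmp w) : WInv (pvBump tmp j 1) (w ++ [j]) := by
  obtain ⟨hlen, hcnt⟩ := h
  refine ⟨by simp [pvBump_length, hlen], fun i hi => ?_⟩
  unfold pvBump
  rw [getD_set, List.count_append]
  by_cases hij : j = i
  · subst hij
    rw [if_pos ⟨rfl, by omega⟩, hcnt j hj]
    push_cast [List.count_cons, List.count_nil]
    simp
  · rw [if_neg (fun hc => hij hc.1), hcnt i hi]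
    have h0 : List.count i [j] = 0 := by
      simp [List.count_cons, List.count_nil]; omega
    rw [h0]
    push_cast
    ring_nf

theorem WInv_remove (tmp : List Int) (w : List Nat) (j : Nat) (hj : j < 26)
    (h : WInv tmp (j :: w)) : WInv (pvBump tmp j (-1)) w := by
  obtain ⟨hlen, hcnt⟩ := h
  refine ⟨by simp [pvBump_length, hlen], fun i hi => ?_⟩
  unfold pvBump
  rw [getD_set]
  by_cases hij : j = i
  · subst hij
    rw [if_pos ⟨rfl, by omega⟩, hcnt j hj]
    push_cast [List.count_cons]
    simp
  · rw [if_neg (fun hc => hij hc.1), hcnt i hi]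
    rw [List.count_cons_of_ne (by omega)]

theorem pvCounts_aux (cs : List Char) (t : List Int)
    (h1 : t.length = 26) (h2 : ∀ i, i < 26 → 0 ≤ t.getD i 0) :
    (cs.foldl (fun t c => pvBump t (pvIdx c) 1) t).length = 26 ∧
      ∀ i, i < 26 → 0 ≤ (cs.foldl (fun t c => pvBump t (pvIdx c) 1) t).getD i 0 := by
  induction cs generalizing t with
  | nil => exact ⟨h1, h2⟩
  | cons c cs ih =>
    refine ih _ (by simp [pvBump_length, h1]) (fun i hi => ?_)
    unfold pvBump
    rw [getD_set]
    split_ifs with h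
    · have := h2 i hi; obtain ⟨h', _⟩ := h; subst h'; omega
    · exact h2 i hi

theorem pvCounts_length (cs : List Char) : (pvCounts cs).length = 26 :=
  (pvCounts_aux cs _ (by simp) (fun i hi => by
    rw [List.getD_eq_getElem _ _ (by simpa using hi), List.getElem_replicate])).1

theorem pvCounts_nonneg (cs : List Char) : ∀ i, i < 26 → 0 ≤ (pvCounts cs).getD i 0 :=
  (pvCounts_aux cs _ (by simp) (fun i hi => by
    rw [List.getD_eq_getElem _ _ (by simpa using hi), List.getElem_replicate])).2
theorem win_ne_of_viol (crd tmp : List Int) (w : List Nat)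
    (hI : WInv tmp w) (hlen : crd.length = 26)
    (hnn : ∀ i, i < 26 → 0 ≤ crd.getD i 0)
    (hv : violN crd tmp ≠ 0) : w ≠ [] := by
  obtain ⟨i, h1, h2, h3⟩ := violN_witness crd tmp hv
  obtain ⟨htl, hcnt⟩ := hI
  have hi : i < 26 := by omega
  have : (0 : Int) < (w.count i : Int) := by
    have := hnn i hi; rw [hcnt i hi] at h3; omega
  intro hw; subst hw; simp at this

theorem shrinkB_zero (s : List Char) (crd : List Int) (fb : Nat)
    (cnt : List Int) (left : Nat) :
    shrinkB s crd fb cnt left 0 = (cnt, left, 0) := by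
  cases fb <;> simp [shrinkB]

-- the bisimulation, by induction on the measure M = (n - right) + (n + 1 - left)
theorem mainT (s : List Char) (crd : List Int)
    (hcl : crd.length = 26) (hcn : ∀ i, i < 26 → 0 ≤ crd.getD i 0) :
    ∀ M : Nat,
      (∀ tmp left right ans, right ≤ s.length → left ≤ right →
        WInv tmp (win s left right) →
        (s.length - right) + (s.length + 1 - left) = M →
        ∀ fuelA, M ≤ fuelA →
        brainLoop s crd fuelA tmp left right ans true
          = (List.foldl (stepB s crd) (tmp, left, (violN crd tmp : Int), ans)
              (List.range' right (s.length - right))).2.2.2) ∧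
      (∀ tmp left right ans, right < s.length → left ≤ right + 1 →
        WInv tmp (win s left (right + 1)) →
        (s.length - right) + (s.length + 1 - left) = M →
        ∀ fuelA, M ≤ fuelA → ∀ fb, right + 1 - left ≤ fb →
        brainLoop s crd fuelA tmp left right ans false
          = (List.foldl (stepB s crd)
              ((shrinkB s crd fb tmp left (violN crd tmp : Int)).1,
               (shrinkB s crd fb tmp left (violN crd tmp : Int)).2.1,
               (shrinkB s crd fb tmp left (violN crd tmp : Int)).2.2,
               ans + ((right : Int)
                 - ((shrinkB s crd fb tmp left (violN crd tmp : Int)).2.1 : Int) + 1))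
              (List.range' (right + 1) (s.length - right - 1))).2.2.2) := by
  intro M
  induction M with
  | zero =>
    constructor
    · intro tmp left right ans hr hl hI hM fuelA hf
      have hrn : right = s.length := by omega
      subst hrn
      have : s.length - s.length = 0 := by omega
      rw [this]
      cases fuelA with
      | zero => simp [brainLoop]
      | succ f => simp [brainLoop]
    · intro tmp left right ans hr _ _ hM
      omega
  | succ M ih =>
    obtain ⟨ihT, ihF⟩ := ih
    have n := s.length
    constructor
    · -- moved = true state
      intro tmp left right ans hr hl hI hM fuelA hf
      by_cases hrn : right < s.length
      · -- fuelA ≥ 1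
        obtain ⟨f, rfl⟩ : ∃ f, fuelA = f + 1 := ⟨fuelA - 1, by omega⟩
        set j := pvIdx (s.getD right ' ') with hjdef
        have hj : j < 26 := pvIdx_lt _
        set tmp1 := pvBump tmp j 1 with htmp1
        have hI1 : WInv tmp1 (win s left (right + 1)) := by
          rw [win_extend s left right hl hrn]
          exact WInv_add tmp _ j hj hI
        have hb1 : (violN crd tmp1 : Int)
            = (violN crd tmp : Int) + (if tmp1.getD j 0 = crd.getD j 0 + 1 then 1 else 0) :=
          violN_inc crd tmp j hj hI.1 hcl
        -- unfold range on the B side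
        have hrange : List.range' right (s.length - right)
            = right :: List.range' (right + 1) (s.length - right - 1) := by
          conv_lhs => rw [show s.length - right = (s.length - right - 1) + 1 from by omega]
          rw [List.range'_succ]
        rw [hrange, List.foldl_cons]
        -- compute stepB
        have hstep : stepB s crd (tmp, left, (violN crd tmp : Int), ans) right
            = ((shrinkB s crd (right+1) tmp1 left (violN crd tmp1 : Int)).1,
               (shrinkB s crd (right+1) tmp1 left (violN crd tmp1 : Int)).2.1,
               (shrinkB s crd (right+1) tmp1 left (violN crd tmp1 : Int)).2.2,
               ans + ((right : Int)
                 - ((shrinkB s crd (right+1) tmp1 left (violN crd tmp1 : Int)).2.1 : Int) + 1)) := by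
          simp only [stepB, ← hjdef, ← htmp1]
          have hsw : (if tmp1.getD j 0 = crd.getD j 0 + 1
              then (violN crd tmp : Int) + 1 else (violN crd tmp : Int))
              = (violN crd tmp1 : Int) := by
            rw [hb1]; split_ifs <;> ring
          rw [hsw]
        rw [hstep]
        -- now case on enough
        cases he : enough crd tmp1 with
        | true =>
          have hv : violN crd tmp1 = 0 := (enough_iff crd tmp1).mp he
          simp only [brainLoop, if_pos hrn, ← hjdef, ← htmp1, he, if_true]
          rw [hv]
          rw [show ((0 : Nat) : Int) = 0 by simp, shrinkB_zero]
          have := ihT tmp1 left (right + 1) (ans + ((right : Int) - (left : Int) + 1))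
            (by omega) (by omega) hI1 (by omega) f (by omega)
          rw [hv] at this
          simpa using this
        | false =>
          have hv : violN crd tmp1 ≠ 0 := by
            intro h; rw [(enough_iff crd tmp1).mpr h] at he; cases he
          -- window nonempty ⇒ left ≤ right (already have), and one shrink step happens
          set j2 := pvIdx (s.getD left ' ') with hj2def
          have hj2 : j2 < 26 := pvIdx_lt _
          set tmp2 := pvBump tmp1 j2 (-1) with htmp2
          have hI2 : WInv tmp2 (win s (left + 1) (right + 1)) := by
            apply WInv_remove tmp1 _ j2 hj2
            rw [← win_shrink s left right hl hrn]
            exact hI1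
          have hb2 : (violN crd tmp2 : Int)
              = (violN crd tmp1 : Int) - (if tmp2.getD j2 0 = crd.getD j2 0 then 1 else 0) :=
            violN_dec crd tmp1 j2 hj2 (by rw [htmp1, pvBump_length, hI.1]) hcl
          have hshrink : shrinkB s crd (right+1) tmp1 left (violN crd tmp1 : Int)
              = shrinkB s crd right tmp2 (left + 1) (violN crd tmp2 : Int) := by
            simp only [shrinkB]
            rw [if_pos (by exact_mod_cast Nat.pos_of_ne_zero hv), ← hj2def, ← htmp2]
            have hsw2 : (if tmp2.getD j2 0 = crd.getD j2 0
                then (violN crd tmp1 : Int) - 1 else (violN crd tmp1 : Int))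
                = (violN crd tmp2 : Int) := by
              rw [hb2]; split_ifs <;> ring
            rw [hsw2]
          simp only [brainLoop, if_pos hrn, ← hjdef, ← htmp1, if_true, he,
            Bool.false_eq_true, if_false, ← hj2def, ← htmp2]
          rw [hshrink]
          exact ihF tmp2 (left + 1) right ans hrn (by omega) hI2 (by omega) f (by omega)
            right (by omega)
      · have hrn' : right = s.length := by omega
        subst hrn'
        rw [Nat.sub_self]
        cases fuelA with
        | zero => simp [brainLoop]
        | succ f2 => simp [brainLoop]
    · -- moved = false state
      intro tmp left right ans hr hl hI hM fuelA hf fb hfb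
      obtain ⟨f, rfl⟩ : ∃ f, fuelA = f + 1 := ⟨fuelA - 1, by omega⟩
      cases he : enough crd tmp with
      | true =>
        have hv : violN crd tmp = 0 := (enough_iff crd tmp).mp he
        rw [hv, show ((0 : Nat) : Int) = 0 by simp, shrinkB_zero]
        simp only [brainLoop, if_pos hr, if_neg (by simp : ¬ (false = true)), he, if_true]
        have := ihT tmp left (right + 1) (ans + ((right : Int) - (left : Int) + 1))
          (by omega) hl hI (by omega) f (by omega)
        rw [hv] at this
        simpa using this
      | false =>
        have hv : violN crd tmp ≠ 0 := by
          intro h; rw [(enough_iff crd tmp).mpr h] at he; cases he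
        -- window nonempty, so left ≤ right
        have hwne : win s left (right + 1) ≠ [] := win_ne_of_viol crd tmp _ hI hcl hcn hv
        have hlr : left ≤ right := by
          by_contra hc
          have : left = right + 1 := by omega
          subst this
          exact hwne (win_empty s _)
        set j2 := pvIdx (s.getD left ' ') with hj2def
        have hj2 : j2 < 26 := pvIdx_lt _
        set tmp2 := pvBump tmp j2 (-1) with htmp2
        have hI2 : WInv tmp2 (win s (left + 1) (right + 1)) := by
          apply WInv_remove tmp _ j2 hj2
          rw [← win_shrink s left right hlr hr]
          exact hI
        have hb2 : (violN crd tmp2 : Int)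
            = (violN crd tmp : Int) - (if tmp2.getD j2 0 = crd.getD j2 0 then 1 else 0) :=
          violN_dec crd tmp j2 hj2 hI.1 hcl
        obtain ⟨fb', rfl⟩ : ∃ g, fb = g + 1 := ⟨fb - 1, by omega⟩
        have hshrink : shrinkB s crd (fb' + 1) tmp left (violN crd tmp : Int)
            = shrinkB s crd fb' tmp2 (left + 1) (violN crd tmp2 : Int) := by
          simp only [shrinkB]
          rw [if_pos (by exact_mod_cast Nat.pos_of_ne_zero hv), ← hj2def, ← htmp2]
          have hsw2 : (if tmp2.getD j2 0 = crd.getD j2 0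
              then (violN crd tmp : Int) - 1 else (violN crd tmp : Int))
              = (violN crd tmp2 : Int) := by
            rw [hb2]; split_ifs <;> ring
          rw [hsw2]
        simp only [brainLoop, if_pos hr, if_neg (by simp : ¬ (false = true)), he, if_false,
          Bool.false_eq_true, ← hj2def, ← htmp2]
        rw [hshrink]
        exact ihF tmp2 (left + 1) right ans hr (by omega) hI2 (by omega) f (by omega)
          fb' (by omega)

theorem violN_init (crd : List Int) (hcn : ∀ i, i < 26 → 0 ≤ crd.getD i 0)
    (hcl : crd.length = 26) : violN crd (List.replicate 26 0) = 0 := by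
  by_contra h
  obtain ⟨i, h1, h2, h3⟩ := violN_witness _ _ h
  have : (List.replicate 26 (0 : Int)).getD i 0 = 0 := by
    rw [List.getD_eq_getElem _ _ h2]; apply List.getElem_replicate
  rw [this] at h3
  have := hcn i (by omega)
  omega

-- ===== VERDICT (by name: the statement is the Claim_ definition above) =====
theorem brain_explosion_spec : Claim_equal_brain_explosion := by
  intro string cards _ _
  unfold Spec_brain_explosion brain_explosion brain_explosion_alt
  set s := string.toList
  set crd := pvCounts cards.toList with hcrd
  have hcl : crd.length = 26 := pvCounts_length _
  have hcn : ∀ i, i < 26 → 0 ≤ crd.getD i 0 := pvCounts_nonneg _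
  have h := (mainT s crd hcl hcn ((s.length - 0) + (s.length + 1 - 0))).1
    (List.replicate 26 0) 0 0 0 (by omega) (by omega)
    ⟨by simp, fun i hi => by
      rw [win_empty, List.getD_eq_getElem _ _ (by simp [hi] : i < (List.replicate 26 (0:Int)).length)]
      rw [List.getElem_replicate]; simp⟩
    rfl (2 * s.length + 2) (by omega)
  rw [violN_init crd hcn hcl] at h
  rw [h, ← List.range_eq_range']
  simp
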